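-- pv_equiv track=rewrite | github.com/zw0583228508/Muzikal | artifacts/music-ai-backend/audio/export_engine.py | _parse_chord_symbol
-- ===== SOURCE A (Python) =====
-- from typing import Dict, Any, List, Optional, Tuple
--
-- _CHORD_KIND_MAP = {
--     "maj7": "major-seventh",  "M7": "major-seventh",
--     "m7":   "minor-seventh",  "min7": "minor-seventh",
--     "7":    "dominant",
--     "m":    "minor",          "min": "minor",
--     "dim7": "diminished-seventh", "dim": "diminished",
--     "aug":  "augmented",
--     "sus4": "suspended-fourth", "sus2": "suspended-second",
--     "6":    "major-sixth",    "m6": "minor-sixth",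
--     "m7b5": "half-diminished", "ø7": "half-diminished",
--     "maj":  "major",          "":   "major",
-- }
--
-- def _parse_chord_symbol(symbol: str) -> Tuple[str, str]:
--     """Return (root_step, quality) for a chord symbol like 'Am7', 'Cmaj7', 'F#m'."""
--     if not symbol:
--         return "C", "major"
--     if len(symbol) >= 2 and symbol[1] in "#b":
--         root = symbol[:2]
--         quality_raw = symbol[2:]
--     else:
--         root = symbol[:1]
--         quality_raw = symbol[1:]
--
--     # Remove slash bass note
--     if "/" in quality_raw:
--         quality_raw = quality_raw.split("/")[0]
--
--     # Map to MusicXML kind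
--     kind = "major"
--     for suffix in sorted(_CHORD_KIND_MAP, key=lambda k: -len(k)):
--         if quality_raw.endswith(suffix) or quality_raw == suffix:
--             kind = _CHORD_KIND_MAP[suffix]
--             break
--
--     return root, kind
-- ===== SOURCE B (Python) =====
-- def _kind_of(s):
--     """MusicXML kind for an exact quality string, or None."""
--     if s == "maj7" or s == "M7": return "major-seventh"
--     if s == "m7" or s == "min7": return "minor-seventh"
--     if s == "7": return "dominant"
--     if s == "m" or s == "min": return "minor"
--     if s == "dim7": return "diminished-seventh"
--     if s == "dim": return "diminished"
--     if s == "aug": return "augmented"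
--     if s == "sus4": return "suspended-fourth"
--     if s == "sus2": return "suspended-second"
--     if s == "6": return "major-sixth"
--     if s == "m6": return "minor-sixth"
--     if s == "m7b5" or s == "ø7": return "half-diminished"
--     if s == "maj" or s == "": return "major"
--     return None
--
-- def _parse_chord_symbol(symbol):
--     """Return (root_step, quality) for a chord symbol like 'Am7', 'Cmaj7', 'F#m'."""
--     if not symbol:
--         return "C", "major"
--     cut = 2 if len(symbol) >= 2 and symbol[1] in "#b" else 1
--     root = symbol[:cut]
--     quality = symbol[cut:]
--     if "/" in quality:
--         quality = quality.split("/")[0]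
--     # Walk the input's own suffixes, longest first; no table entry is longer than 4,
--     # and the empty suffix maps to "major", so the walk always produces a kind.
--     n = len(quality)
--     for L in range(min(n, 4), -1, -1):
--         kind = _kind_of(quality[n - L:])
--         if kind is not None:
--             return root, kind
--     return root, "major"  # unreachable: _kind_of("") == "major"
-- ===== Notes on version B (the rewrite author's own statement) =====
-- stated objective: idiomatic
-- what changed: The dict and its scan over every key (sorted by descending length, endswith-testing each) are replaced by an exact-lookup function and a walk over the input's own suffixes from longest (length 4) to shortest, returning on the first suffix the lookup knows; the root split is computed via a single cut index instead of duplicated branches.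
import Mathlib
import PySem

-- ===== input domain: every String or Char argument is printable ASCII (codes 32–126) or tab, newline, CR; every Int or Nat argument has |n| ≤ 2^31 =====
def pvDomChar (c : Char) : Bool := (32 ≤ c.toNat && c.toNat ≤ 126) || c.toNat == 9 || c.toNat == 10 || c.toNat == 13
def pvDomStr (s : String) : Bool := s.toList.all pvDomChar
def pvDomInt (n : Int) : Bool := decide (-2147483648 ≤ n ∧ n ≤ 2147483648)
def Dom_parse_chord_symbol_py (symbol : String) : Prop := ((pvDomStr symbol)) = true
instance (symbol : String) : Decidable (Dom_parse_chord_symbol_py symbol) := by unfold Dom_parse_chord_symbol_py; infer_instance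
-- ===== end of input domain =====

-- B replaces A's dict and its scan over every key (sorted by descending length, endswith test each)
-- by an exact-lookup function and a walk over the input's own suffixes, longest first (idiomatic; same result).

-- ===== PORT A =====
-- _CHORD_KIND_MAP (A's dict)
def chordKindMap : PySem.Dict String String := PySem.Dict.ofList
  [("maj7","major-seventh"),("M7","major-seventh"),
   ("m7","minor-seventh"),("min7","minor-seventh"),
   ("7","dominant"),
   ("m","minor"),("min","minor"),
   ("dim7","diminished-seventh"),("dim","diminished"),
   ("aug","augmented"),
   ("sus4","suspended-fourth"),("sus2","suspended-second"),
   ("6","major-sixth"),("m6","minor-sixth"),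
   ("m7b5","half-diminished"),("ø7","half-diminished"),
   ("maj","major"),("","major")]

-- A's loop: first suffix in the length-sorted key list that matches
def kindScanA (q : String) : List String → String
  | [] => "major"
  | k :: ks =>
      if PySem.Str.endswith q k || q == k then
        (PySem.Dict.get? chordKindMap k).getD "major"   -- _CHORD_KIND_MAP[suffix]; k comes from the dict, so it is present
      else kindScanA q ks

def parse_chord_symbol_py (symbol : String) : String × String :=
  if symbol == "" then ("C", "major")
  else
    let hasAccidental :=
      2 ≤ PySem.Str.len symbol &&
        (match PySem.Str.pyGet? symbol 1 with
         | some c => PySem.Str.isIn (String.ofList [c]) "#b"   -- symbol[1] in "#b"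
         | none => false)
    let root := if hasAccidental then PySem.Str.slice symbol none (some 2)
                else PySem.Str.slice symbol none (some 1)
    let q0 := if hasAccidental then PySem.Str.slice symbol (some 2) none
              else PySem.Str.slice symbol (some 1) none
    let q := if PySem.Str.isIn "/" q0 then
               (match PySem.Str.split? q0 "/" with   -- quality_raw.split("/")[0]
                | some (p :: _) => p
                | _ => q0)
             else q0
    (root, kindScanA q
      (PySem.List.sorted (PySem.Dict.keys chordKindMap) (fun k => -(PySem.Str.len k : Int)) false))

-- ===== PORT B =====
-- _kind_of: MusicXML kind for an exact quality string, or None (Source B's if/elif chain)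
def kindOf (s : String) : Option String :=
  if s == "maj7" || s == "M7" then some "major-seventh"
  else if s == "m7" || s == "min7" then some "minor-seventh"
  else if s == "7" then some "dominant"
  else if s == "m" || s == "min" then some "minor"
  else if s == "dim7" then some "diminished-seventh"
  else if s == "dim" then some "diminished"
  else if s == "aug" then some "augmented"
  else if s == "sus4" then some "suspended-fourth"
  else if s == "sus2" then some "suspended-second"
  else if s == "6" then some "major-sixth"
  else if s == "m6" then some "minor-sixth"
  else if s == "m7b5" || s == "ø7" then some "half-diminished"
  else if s == "maj" || s == "" then some "major"
  else none

-- quality[n - L:]  (n = len(quality), 0 ≤ L ≤ n)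
def sfxB (q : String) (L : Nat) : String :=
  PySem.Str.slice q (some ((q.toList.length - L : Nat) : Int)) none

-- Source B's for-loop over L = min(n,4) .. 0: first suffix _kind_of knows wins;
-- the final 'return root, "major"' of Source B is the base case's none-branch
def kindWalkB (q : String) : Nat → String
  | 0 =>
      match kindOf (sfxB q 0) with
      | some v => v
      | none => "major"
  | (L+1) =>
      match kindOf (sfxB q (L+1)) with
      | some v => v
      | none => kindWalkB q L

def parse_chord_symbol_py_alt (symbol : String) : String × String :=
  if symbol == "" then ("C", "major")
  else
    let cut : Int :=
      if 2 ≤ PySem.Str.len symbol &&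
           ((PySem.Str.pyGet? symbol 1).map
             (fun c => PySem.Str.isIn (String.ofList [c]) "#b")).getD false   -- symbol[1] in "#b" (in range: len ≥ 2)
      then 2 else 1
    let root := PySem.Str.slice symbol none (some cut)
    let quality0 := PySem.Str.slice symbol (some cut) none
    let quality := if PySem.Str.isIn "/" quality0 then
                     ((PySem.Str.split? quality0 "/").getD []).headD quality0   -- quality.split("/")[0] (sep ≠ "", result nonempty)
                   else quality0
    (root, kindWalkB quality (min quality.toList.length 4))

-- ===== PRECONDITION & SPEC =====
def Spec_parse_chord_symbol_py (symbol : String) (out : String × String) : Prop := out = parse_chord_symbol_py_alt symbol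
instance (symbol : String) (out : String × String) : Decidable (Spec_parse_chord_symbol_py symbol out) := by unfold Spec_parse_chord_symbol_py; infer_instance

-- ===== CLAIM (what is proved, stated in full; the proofs are below) =====
def Claim_equal_parse_chord_symbol_py : Prop := ∀ (symbol : String), Dom_parse_chord_symbol_py symbol → Spec_parse_chord_symbol_py symbol (parse_chord_symbol_py symbol)

-- ===== LEMMAS AND PROOFS =====

-- the key list A's sorted(...) produces, as a literal
theorem sortedKeys_eq :
    PySem.List.sorted (PySem.Dict.keys chordKindMap) (fun k => -(PySem.Str.len k : Int)) false
      = ["maj7","min7","dim7","sus4","sus2","m7b5","min","dim","aug","maj","M7","m7","m6","ø7","7","m","6",""] := by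
  decide

theorem strbeq (k s : String) : (k == s) = (k.toList == s.toList) := by
  by_cases h : k = s
  · simp [h]
  · have h2 : k.toList ≠ s.toList := fun hh => h (String.toList_inj.mp hh)
    simp [h, h2]

theorem beqF (k s : String) (h : k.toList.length ≠ s.toList.length) : (k == s) = false := by
  rw [strbeq]
  have : k.toList ≠ s.toList := fun hh => h (by rw [hh])
  simp [this]

theorem beqComm (a b : String) : (a == b) = (b == a) := by
  by_cases h : a = b
  · simp [h]
  · have h' : b ≠ a := fun e => h e.symm
    simp [h, h']

theorem sfxB_toList (q : String) (L : Nat) :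
    (sfxB q L).toList = q.toList.drop (q.toList.length - L) := by
  simp [sfxB, PySem.Str.toList_slice, PySem.List.slice_from_natCast]

theorem sfxB_len (q : String) (L : Nat) (h : L ≤ q.toList.length) :
    (sfxB q L).toList.length = L := by
  rw [sfxB_toList]
  simp only [List.length_drop]
  omega

theorem scan_cons (q k : String) (ks : List String) :
    kindScanA q (k :: ks)
      = if PySem.Str.endswith q k || q == k then
          (PySem.Dict.get? chordKindMap k).getD "major"
        else kindScanA q ks := rfl

-- A's test '(q.endswith(k) or q == k)' compared with q's own length-L suffix
theorem condA_true (q k : String) (L : Nat) (hkL : k.toList.length = L) (h : L ≤ q.toList.length) :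
    (PySem.Str.endswith q k || q == k) = (k.toList == q.toList.drop (q.toList.length - L)) := by
  subst hkL
  have hiff : PySem.Str.endswith q k = true ↔ k.toList <:+ q.toList := by
    rw [PySem.Str.endswith_eq]; exact PySem.Chars.endswith_iff _ _
  have hsuf : k.toList <:+ q.toList ↔ k.toList = q.toList.drop (q.toList.length - k.toList.length) := by
    constructor
    · intro hs; obtain ⟨p, hp⟩ := hs
      rw [← hp]
      have hlen : (p ++ k.toList).length - k.toList.length = p.length := by simp
      rw [hlen, List.drop_left]
    · intro he; exact he ▸ List.drop_suffix _ _
  cases hq : (q == k) with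
  | true =>
      have hqk : q = k := by simpa using hq
      subst hqk
      have hd : q.toList.drop (q.toList.length - q.toList.length) = q.toList := by simp
      rw [hd]; simp
  | false =>
      simp only [Bool.or_false]
      cases he : PySem.Str.endswith q k with
      | true =>
          have h2 := hsuf.mp (hiff.mp he)
          rw [← h2]; simp
      | false =>
          have h2 : k.toList ≠ q.toList.drop (q.toList.length - k.toList.length) := fun hh => by
            rw [hiff.mpr (hsuf.mpr hh)] at he; cases he
          rw [beq_eq_false_iff_ne.mpr h2]

theorem condA_false (q k : String) (L : Nat) (hkL : k.toList.length = L) (h : q.toList.length < L) :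
    (PySem.Str.endswith q k || q == k) = false := by
  subst hkL
  have h1 : PySem.Str.endswith q k = false := by
    cases he : PySem.Str.endswith q k with
    | false => rfl
    | true =>
        have hs : k.toList <:+ q.toList := by
          rw [PySem.Str.endswith_eq] at he; exact (PySem.Chars.endswith_iff _ _).mp he
        have := hs.length_le; omega
  have h2 : (q == k) = false := beqF q k (by omega)
  rw [h1, h2]; rfl

-- kindOf on strings of each length, reduced to the possible keys of that length
theorem kindOf_len4 (s : String) (h : s.toList.length = 4) :
    kindOf s =
      if "maj7" == s then some "major-seventh" else
      if "min7" == s then some "minor-seventh" else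
      if "dim7" == s then some "diminished-seventh" else
      if "sus4" == s then some "suspended-fourth" else
      if "sus2" == s then some "suspended-second" else
      if "m7b5" == s then some "half-diminished" else
      none := by
  have hne : ∀ k : String, k.toList.length ≠ 4 → (s == k) = false :=
    fun k hk => by rw [beqComm]; exact beqF k s (by omega)
  unfold kindOf
  rw [beqComm s "maj7", beqComm s "min7", beqComm s "dim7", beqComm s "sus4",
      beqComm s "sus2", beqComm s "m7b5"]
  rw [hne "M7" (by decide), hne "m7" (by decide), hne "7" (by decide),
      hne "m" (by decide), hne "min" (by decide), hne "dim" (by decide),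
      hne "aug" (by decide), hne "6" (by decide), hne "m6" (by decide),
      hne "ø7" (by decide), hne "maj" (by decide), hne "" (by decide)]
  simp only [Bool.or_false, Bool.false_or, Bool.false_eq_true, if_false]

theorem kindOf_len3 (s : String) (h : s.toList.length = 3) :
    kindOf s =
      if "min" == s then some "minor" else
      if "dim" == s then some "diminished" else
      if "aug" == s then some "augmented" else
      if "maj" == s then some "major" else
      none := by
  have hne : ∀ k : String, k.toList.length ≠ 3 → (s == k) = false :=
    fun k hk => by rw [beqComm]; exact beqF k s (by omega)
  unfold kindOf
  rw [beqComm s "min", beqComm s "dim", beqComm s "aug", beqComm s "maj"]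
  rw [hne "maj7" (by decide), hne "M7" (by decide), hne "m7" (by decide),
      hne "min7" (by decide), hne "7" (by decide), hne "m" (by decide),
      hne "dim7" (by decide), hne "sus4" (by decide), hne "sus2" (by decide),
      hne "6" (by decide), hne "m6" (by decide), hne "m7b5" (by decide),
      hne "ø7" (by decide), hne "" (by decide)]
  simp only [Bool.or_false, Bool.false_or, Bool.false_eq_true, if_false]

theorem kindOf_len2 (s : String) (h : s.toList.length = 2) :
    kindOf s =
      if "M7" == s then some "major-seventh" else
      if "m7" == s then some "minor-seventh" else
      if "m6" == s then some "minor-sixth" else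
      if "ø7" == s then some "half-diminished" else
      none := by
  have hne : ∀ k : String, k.toList.length ≠ 2 → (s == k) = false :=
    fun k hk => by rw [beqComm]; exact beqF k s (by omega)
  unfold kindOf
  rw [beqComm s "M7", beqComm s "m7", beqComm s "m6", beqComm s "ø7"]
  rw [hne "maj7" (by decide), hne "min7" (by decide), hne "7" (by decide),
      hne "m" (by decide), hne "min" (by decide), hne "dim7" (by decide),
      hne "dim" (by decide), hne "aug" (by decide), hne "sus4" (by decide),
      hne "sus2" (by decide), hne "6" (by decide), hne "m7b5" (by decide),
      hne "maj" (by decide), hne "" (by decide)]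
  simp only [Bool.or_false, Bool.false_or, Bool.false_eq_true, if_false]

theorem kindOf_len1 (s : String) (h : s.toList.length = 1) :
    kindOf s =
      if "7" == s then some "dominant" else
      if "m" == s then some "minor" else
      if "6" == s then some "major-sixth" else
      none := by
  have hne : ∀ k : String, k.toList.length ≠ 1 → (s == k) = false :=
    fun k hk => by rw [beqComm]; exact beqF k s (by omega)
  unfold kindOf
  rw [beqComm s "7", beqComm s "m", beqComm s "6"]
  rw [hne "maj7" (by decide), hne "M7" (by decide), hne "m7" (by decide),
      hne "min7" (by decide), hne "min" (by decide), hne "dim7" (by decide),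
      hne "dim" (by decide), hne "aug" (by decide), hne "sus4" (by decide),
      hne "sus2" (by decide), hne "m6" (by decide), hne "m7b5" (by decide),
      hne "ø7" (by decide), hne "maj" (by decide), hne "" (by decide)]
  simp only [Bool.or_false, Bool.false_eq_true, if_false]

theorem kindOf_len0 (s : String) (h : s.toList.length = 0) :
    kindOf s = some "major" := by
  have hs : s = "" := String.toList_inj.mp (by simpa using List.length_eq_zero_iff.mp h)
  subst hs; decide

-- the scan over keys of length 0 equals the walk from level 0
theorem tail0 (q : String) : kindScanA q [""] = kindWalkB q 0 := by
  have h0 : (sfxB q 0).toList.length = 0 := sfxB_len q 0 (Nat.zero_le _)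
  have hw : kindWalkB q 0
      = match kindOf (sfxB q 0) with
        | some v => v
        | none => "major" := rfl
  rw [hw, kindOf_len0 _ h0]
  rw [scan_cons, condA_true q "" 0 (by decide) (Nat.zero_le _)]
  have hd : q.toList.drop (q.toList.length - 0) = [] := by
    rw [Nat.sub_zero]; exact List.drop_length
  have c0 : ("".toList == q.toList.drop (q.toList.length - 0)) = true := by rw [hd]; rfl
  rw [if_pos c0]; rfl

theorem walk_succ_eq (q : String) (L : Nat) : kindWalkB q (L + 1)
    = match kindOf (sfxB q (L + 1)) with
      | some v => v
      | none => kindWalkB q L := rfl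

-- the scan over keys of length ≤ 1 equals the walk from level 1
theorem tail1 (q : String) (h : 1 ≤ q.toList.length) :
    kindScanA q ["7","m","6",""] = kindWalkB q 1 := by
  have hm : (sfxB q 1).toList.length = 1 := sfxB_len q 1 h
  have hw : kindWalkB q 1
      = match kindOf (sfxB q 1) with
        | some v => v
        | none => kindWalkB q 0 := walk_succ_eq q 0
  rw [hw, kindOf_len1 _ hm]
  rw [strbeq "7" (sfxB q 1), strbeq "m" (sfxB q 1), strbeq "6" (sfxB q 1), sfxB_toList]
  rw [scan_cons, condA_true q "7" 1 (by decide) h,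
      scan_cons, condA_true q "m" 1 (by decide) h,
      scan_cons, condA_true q "6" 1 (by decide) h]
  by_cases c0 : ("7".toList == q.toList.drop (q.toList.length - 1)) = true
  · rw [if_pos c0, if_pos c0]; rfl
  rw [if_neg c0, if_neg c0]
  by_cases c1 : ("m".toList == q.toList.drop (q.toList.length - 1)) = true
  · rw [if_pos c1, if_pos c1]; rfl
  rw [if_neg c1, if_neg c1]
  by_cases c2 : ("6".toList == q.toList.drop (q.toList.length - 1)) = true
  · rw [if_pos c2, if_pos c2]; rfl
  rw [if_neg c2, if_neg c2]
  exact tail0 q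

-- the scan over keys of length ≤ 2 equals the walk from level 2
theorem tail2 (q : String) (h : 2 ≤ q.toList.length) :
    kindScanA q ["M7","m7","m6","ø7","7","m","6",""] = kindWalkB q 2 := by
  have hm : (sfxB q 2).toList.length = 2 := sfxB_len q 2 h
  have hw : kindWalkB q 2
      = match kindOf (sfxB q 2) with
        | some v => v
        | none => kindWalkB q 1 := walk_succ_eq q 1
  rw [hw, kindOf_len2 _ hm]
  rw [strbeq "M7" (sfxB q 2), strbeq "m7" (sfxB q 2), strbeq "m6" (sfxB q 2), strbeq "ø7" (sfxB q 2), sfxB_toList]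
  rw [scan_cons, condA_true q "M7" 2 (by decide) h,
      scan_cons, condA_true q "m7" 2 (by decide) h,
      scan_cons, condA_true q "m6" 2 (by decide) h,
      scan_cons, condA_true q "ø7" 2 (by decide) h]
  by_cases c0 : ("M7".toList == q.toList.drop (q.toList.length - 2)) = true
  · rw [if_pos c0, if_pos c0]; rfl
  rw [if_neg c0, if_neg c0]
  by_cases c1 : ("m7".toList == q.toList.drop (q.toList.length - 2)) = true
  · rw [if_pos c1, if_pos c1]; rfl
  rw [if_neg c1, if_neg c1]
  by_cases c2 : ("m6".toList == q.toList.drop (q.toList.length - 2)) = true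
  · rw [if_pos c2, if_pos c2]; rfl
  rw [if_neg c2, if_neg c2]
  by_cases c3 : ("ø7".toList == q.toList.drop (q.toList.length - 2)) = true
  · rw [if_pos c3, if_pos c3]; rfl
  rw [if_neg c3, if_neg c3]
  exact tail1 q (by omega)

-- the scan over keys of length ≤ 3 equals the walk from level 3
theorem tail3 (q : String) (h : 3 ≤ q.toList.length) :
    kindScanA q ["min","dim","aug","maj","M7","m7","m6","ø7","7","m","6",""] = kindWalkB q 3 := by
  have hm : (sfxB q 3).toList.length = 3 := sfxB_len q 3 h
  have hw : kindWalkB q 3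
      = match kindOf (sfxB q 3) with
        | some v => v
        | none => kindWalkB q 2 := walk_succ_eq q 2
  rw [hw, kindOf_len3 _ hm]
  rw [strbeq "min" (sfxB q 3), strbeq "dim" (sfxB q 3), strbeq "aug" (sfxB q 3), strbeq "maj" (sfxB q 3), sfxB_toList]
  rw [scan_cons, condA_true q "min" 3 (by decide) h,
      scan_cons, condA_true q "dim" 3 (by decide) h,
      scan_cons, condA_true q "aug" 3 (by decide) h,
      scan_cons, condA_true q "maj" 3 (by decide) h]
  by_cases c0 : ("min".toList == q.toList.drop (q.toList.length - 3)) = true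
  · rw [if_pos c0, if_pos c0]; rfl
  rw [if_neg c0, if_neg c0]
  by_cases c1 : ("dim".toList == q.toList.drop (q.toList.length - 3)) = true
  · rw [if_pos c1, if_pos c1]; rfl
  rw [if_neg c1, if_neg c1]
  by_cases c2 : ("aug".toList == q.toList.drop (q.toList.length - 3)) = true
  · rw [if_pos c2, if_pos c2]; rfl
  rw [if_neg c2, if_neg c2]
  by_cases c3 : ("maj".toList == q.toList.drop (q.toList.length - 3)) = true
  · rw [if_pos c3, if_pos c3]; rfl
  rw [if_neg c3, if_neg c3]
  exact tail2 q (by omega)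

-- the scan over keys of length ≤ 4 equals the walk from level 4
theorem tail4 (q : String) (h : 4 ≤ q.toList.length) :
    kindScanA q ["maj7","min7","dim7","sus4","sus2","m7b5","min","dim","aug","maj","M7","m7","m6","ø7","7","m","6",""] = kindWalkB q 4 := by
  have hm : (sfxB q 4).toList.length = 4 := sfxB_len q 4 h
  have hw : kindWalkB q 4
      = match kindOf (sfxB q 4) with
        | some v => v
        | none => kindWalkB q 3 := walk_succ_eq q 3
  rw [hw, kindOf_len4 _ hm]
  rw [strbeq "maj7" (sfxB q 4), strbeq "min7" (sfxB q 4), strbeq "dim7" (sfxB q 4), strbeq "sus4" (sfxB q 4), strbeq "sus2" (sfxB q 4), strbeq "m7b5" (sfxB q 4), sfxB_toList]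
  rw [scan_cons, condA_true q "maj7" 4 (by decide) h,
      scan_cons, condA_true q "min7" 4 (by decide) h,
      scan_cons, condA_true q "dim7" 4 (by decide) h,
      scan_cons, condA_true q "sus4" 4 (by decide) h,
      scan_cons, condA_true q "sus2" 4 (by decide) h,
      scan_cons, condA_true q "m7b5" 4 (by decide) h]
  by_cases c0 : ("maj7".toList == q.toList.drop (q.toList.length - 4)) = true
  · rw [if_pos c0, if_pos c0]; rfl
  rw [if_neg c0, if_neg c0]
  by_cases c1 : ("min7".toList == q.toList.drop (q.toList.length - 4)) = true
  · rw [if_pos c1, if_pos c1]; rfl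
  rw [if_neg c1, if_neg c1]
  by_cases c2 : ("dim7".toList == q.toList.drop (q.toList.length - 4)) = true
  · rw [if_pos c2, if_pos c2]; rfl
  rw [if_neg c2, if_neg c2]
  by_cases c3 : ("sus4".toList == q.toList.drop (q.toList.length - 4)) = true
  · rw [if_pos c3, if_pos c3]; rfl
  rw [if_neg c3, if_neg c3]
  by_cases c4 : ("sus2".toList == q.toList.drop (q.toList.length - 4)) = true
  · rw [if_pos c4, if_pos c4]; rfl
  rw [if_neg c4, if_neg c4]
  by_cases c5 : ("m7b5".toList == q.toList.drop (q.toList.length - 4)) = true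
  · rw [if_pos c5, if_pos c5]; rfl
  rw [if_neg c5, if_neg c5]
  exact tail3 q (by omega)

theorem kind_eq (q : String) :
    kindScanA q ["maj7","min7","dim7","sus4","sus2","m7b5","min","dim","aug","maj","M7","m7","m6","ø7","7","m","6",""]
      = kindWalkB q (min q.toList.length 4) := by
  by_cases h4 : 4 ≤ q.toList.length
  · rw [Nat.min_eq_right h4]
    exact tail4 q h4
  · have : q.toList.length = 0 ∨ q.toList.length = 1 ∨ q.toList.length = 2 ∨ q.toList.length = 3 := by omega
    rcases this with hn | hn | hn | hn
    · rw [scan_cons, condA_false q "maj7" 4 (by decide) (by omega),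
          scan_cons, condA_false q "min7" 4 (by decide) (by omega),
          scan_cons, condA_false q "dim7" 4 (by decide) (by omega),
          scan_cons, condA_false q "sus4" 4 (by decide) (by omega),
          scan_cons, condA_false q "sus2" 4 (by decide) (by omega),
          scan_cons, condA_false q "m7b5" 4 (by decide) (by omega),
          scan_cons, condA_false q "min" 3 (by decide) (by omega),
          scan_cons, condA_false q "dim" 3 (by decide) (by omega),
          scan_cons, condA_false q "aug" 3 (by decide) (by omega),
          scan_cons, condA_false q "maj" 3 (by decide) (by omega),
          scan_cons, condA_false q "M7" 2 (by decide) (by omega),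
          scan_cons, condA_false q "m7" 2 (by decide) (by omega),
          scan_cons, condA_false q "m6" 2 (by decide) (by omega),
          scan_cons, condA_false q "ø7" 2 (by decide) (by omega),
          scan_cons, condA_false q "7" 1 (by decide) (by omega),
          scan_cons, condA_false q "m" 1 (by decide) (by omega),
          scan_cons, condA_false q "6" 1 (by decide) (by omega)]
      simp only [Bool.false_eq_true, if_false]
      rw [show min q.toList.length 4 = 0 by omega]
      exact tail0 q
    · rw [scan_cons, condA_false q "maj7" 4 (by decide) (by omega),
          scan_cons, condA_false q "min7" 4 (by decide) (by omega),
          scan_cons, condA_false q "dim7" 4 (by decide) (by omega),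
          scan_cons, condA_false q "sus4" 4 (by decide) (by omega),
          scan_cons, condA_false q "sus2" 4 (by decide) (by omega),
          scan_cons, condA_false q "m7b5" 4 (by decide) (by omega),
          scan_cons, condA_false q "min" 3 (by decide) (by omega),
          scan_cons, condA_false q "dim" 3 (by decide) (by omega),
          scan_cons, condA_false q "aug" 3 (by decide) (by omega),
          scan_cons, condA_false q "maj" 3 (by decide) (by omega),
          scan_cons, condA_false q "M7" 2 (by decide) (by omega),
          scan_cons, condA_false q "m7" 2 (by decide) (by omega),
          scan_cons, condA_false q "m6" 2 (by decide) (by omega),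
          scan_cons, condA_false q "ø7" 2 (by decide) (by omega)]
      simp only [Bool.false_eq_true, if_false]
      rw [show min q.toList.length 4 = 1 by omega]
      exact tail1 q (by omega)
    · rw [scan_cons, condA_false q "maj7" 4 (by decide) (by omega),
          scan_cons, condA_false q "min7" 4 (by decide) (by omega),
          scan_cons, condA_false q "dim7" 4 (by decide) (by omega),
          scan_cons, condA_false q "sus4" 4 (by decide) (by omega),
          scan_cons, condA_false q "sus2" 4 (by decide) (by omega),
          scan_cons, condA_false q "m7b5" 4 (by decide) (by omega),
          scan_cons, condA_false q "min" 3 (by decide) (by omega),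
          scan_cons, condA_false q "dim" 3 (by decide) (by omega),
          scan_cons, condA_false q "aug" 3 (by decide) (by omega),
          scan_cons, condA_false q "maj" 3 (by decide) (by omega)]
      simp only [Bool.false_eq_true, if_false]
      rw [show min q.toList.length 4 = 2 by omega]
      exact tail2 q (by omega)
    · rw [scan_cons, condA_false q "maj7" 4 (by decide) (by omega),
          scan_cons, condA_false q "min7" 4 (by decide) (by omega),
          scan_cons, condA_false q "dim7" 4 (by decide) (by omega),
          scan_cons, condA_false q "sus4" 4 (by decide) (by omega),
          scan_cons, condA_false q "sus2" 4 (by decide) (by omega),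
          scan_cons, condA_false q "m7b5" 4 (by decide) (by omega)]
      simp only [Bool.false_eq_true, if_false]
      rw [show min q.toList.length 4 = 3 by omega]
      exact tail3 q (by omega)

-- ===== VERDICT (by name: the statement is the Claim_ definition above) =====
theorem parse_chord_symbol_py_spec : Claim_equal_parse_chord_symbol_py := by
  intro symbol _
  unfold Spec_parse_chord_symbol_py parse_chord_symbol_py parse_chord_symbol_py_alt
  have hopt : ∀ (o : Option Char) (f : Char → Bool),
      (o.map f).getD false = (match o with | some c => f c | none => false) := by
    intro o f; cases o <;> rfl
  have hsplit : ∀ (o : Option (List String)) (d : String),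
      (o.getD []).headD d = (match o with | some (p :: _) => p | _ => d) := by
    intro o d; rcases o with _ | ⟨_ | ⟨p, l⟩⟩ <;> rfl
  simp only [hopt, hsplit]
  by_cases h : symbol == ""
  · simp [h]
  · simp only [h, Bool.false_eq_true, if_false]
    by_cases hc : (2 ≤ PySem.Str.len symbol &&
        (match PySem.Str.pyGet? symbol 1 with
         | some c => PySem.Str.isIn (String.ofList [c]) "#b"
         | none => false)) = true
    · simp only [hc, if_true]
      rw [sortedKeys_eq, kind_eq]
    · simp only [hc, Bool.false_eq_true, if_false]
      rw [sortedKeys_eq, kind_eq]
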